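-- pv_equiv track=rewrite | github.com/warriorwizard/CodeTantra-python-placement | L77/Coding Exercises Using Arrays/8.py | valley
-- ===== SOURCE A (Python) =====
-- def valley(l):
--
--     if (len(l)<3):
--     	return False
--     up_count =1
--     low_count =1
--     for i in range(0, len(l)-1):
--     	if l[i]>l[i+1]:
--     		if low_count >1:
--
--     			return False
--     		up_count = up_count +1
--     	if l[i] <l[i+1]:
--     		low_count = low_count+1
--     	if l[i]==l[i+1]:
--     		return False
--     if up_count>1 and low_count > 1:
--     	return True
--     else:
--     	return False
-- ===== SOURCE B (Python) =====
-- def valley(l):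
--     n = len(l)
--     if n < 3:
--         return False
--     i = 0
--     while i < n - 1 and l[i] > l[i + 1]:
--         i += 1
--     if i == 0:
--         return False
--     j = i
--     while i < n - 1 and l[i] < l[i + 1]:
--         i += 1
--     return i > j and i == n - 1
-- ===== Notes on version B (the rewrite author's own statement) =====
-- stated objective: alternative
-- what changed: Replaces A's single pass that maintains two counters and checks both counts at the end with a two-phase pointer scan: one while loop walks down the strict descent, a second walks up the strict ascent, and the valley test is just 'descent moved, ascent moved, and the ascent ends at the last index'.
import Mathlib
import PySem

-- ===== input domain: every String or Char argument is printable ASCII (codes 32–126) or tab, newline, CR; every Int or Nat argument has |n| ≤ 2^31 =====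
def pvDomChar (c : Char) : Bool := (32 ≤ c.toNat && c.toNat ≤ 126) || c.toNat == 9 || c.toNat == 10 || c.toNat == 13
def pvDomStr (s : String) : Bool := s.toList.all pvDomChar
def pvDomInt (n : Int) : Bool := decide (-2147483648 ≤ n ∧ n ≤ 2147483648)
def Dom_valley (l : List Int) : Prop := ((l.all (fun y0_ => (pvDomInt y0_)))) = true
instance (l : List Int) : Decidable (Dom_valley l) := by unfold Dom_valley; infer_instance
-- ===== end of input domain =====

-- B replaces A's counter-maintaining single pass with a two-phase pointer scan
-- (descend, then ascend, then check the ascent ends at the last index); same cost, different decomposition.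


-- ===== PORT A =====
-- the 'for i in range(0, len(l)-1)' loop over adjacent pairs l[i], l[i+1], carrying
-- up_count/low_count; returning false encodes A's early 'return False'. The three ifs
-- in A have mutually exclusive conditions, kept in A's order.
def valleyLoop (l : List Int) (up low : Int) : Bool :=
  match l with
  | x :: y :: rest =>
      if x > y then
        if low > 1 then false else valleyLoop (y :: rest) (up + 1) low
      else if x < y then
        valleyLoop (y :: rest) up (low + 1)
      else false
  | _ => decide (up > 1) && decide (low > 1)

def valley (l : List Int) : Bool :=
  if l.length < 3 then false else valleyLoop l 1 1

-- ===== PORT B =====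
-- B's first while loop: number of steps i advances while l[i] > l[i+1]
-- (the index walk over l is transcribed as structural recursion over the suffix).
def downRun : List Int → Nat
  | x :: y :: rest => if x > y then downRun (y :: rest) + 1 else 0
  | _ => 0

-- B's second while loop: number of steps i advances while l[i] < l[i+1].
def upRun : List Int → Nat
  | x :: y :: rest => if x < y then upRun (y :: rest) + 1 else 0
  | _ => 0

def valley_alt (l : List Int) : Bool :=
  if l.length < 3 then false
  else
    let i := downRun l
    if i = 0 then false
    else
      let j := i
      let k := j + upRun (l.drop i)   -- second while resumes at index i, i.e. on the suffix l.drop i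
      decide (k > j) && decide (k = l.length - 1)

-- ===== PRECONDITION & SPEC =====
def Spec_valley (l : List Int) (out : Bool) : Prop := out = valley_alt l
instance (l : List Int) (out : Bool) : Decidable (Spec_valley l out) := by unfold Spec_valley; infer_instance

-- ===== CLAIM (what is proved, stated in full; the proofs are below) =====
def Claim_equal_valley : Prop := ∀ (l : List Int), Dom_valley l → Spec_valley l (valley l)

-- ===== LEMMAS AND PROOFS =====

-- Ascent phase: once low_count > 1, A's loop returns true iff the rest is a strict ascent
-- reaching the end, with up_count frozen.
lemma valleyLoop_asc (l : List Int) (up low : Int) (h : low > 1) :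
    valleyLoop l up low = (decide (up > 1) && decide (upRun l = l.length - 1)) := by
  induction l generalizing low with
  | nil => simp [valleyLoop, upRun, h]
  | cons x t ih =>
    cases t with
    | nil => simp [valleyLoop, upRun, h]
    | cons y r =>
      by_cases hgt : x > y
      · rw [valleyLoop, if_pos hgt, if_pos h, upRun, if_neg (by omega : ¬ x < y)]
        rw [Bool.eq_iff_iff]
        simp only [Bool.and_eq_true, decide_eq_true_eq, List.length_cons,
          Bool.false_eq_true, false_iff]
        omega
      · by_cases hlt : x < y
        · rw [valleyLoop, if_neg hgt, if_pos hlt, upRun, if_pos hlt,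
            ih (low + 1) (by omega)]
          congr 1
          simp only [decide_eq_decide, List.length_cons]
          omega
        · rw [valleyLoop, if_neg hgt, if_neg hlt, upRun, if_neg hlt]
          rw [Bool.eq_iff_iff]
          simp only [Bool.and_eq_true, decide_eq_true_eq, List.length_cons,
            Bool.false_eq_true, false_iff]
          omega

-- Descent phase: characterization of A's loop while low_count is still 1.
lemma valleyLoop_desc (l : List Int) (up : Int) :
    valleyLoop l up 1 =
      (decide (up + downRun l > 1) &&
       decide (downRun l + upRun (l.drop (downRun l)) = l.length - 1) &&
       decide (upRun (l.drop (downRun l)) > 0)) := by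
  induction l generalizing up with
  | nil => simp [valleyLoop, downRun, upRun]
  | cons x t ih =>
    cases t with
    | nil => simp [valleyLoop, downRun, upRun]
    | cons y r =>
      by_cases hgt : x > y
      · rw [valleyLoop, if_pos hgt, if_neg (by omega : ¬ (1:Int) > 1), ih (up + 1),
          downRun, if_pos hgt, List.drop_succ_cons]
        congr 1
        congr 1
        · simp only [decide_eq_decide]; push_cast; omega
        · simp only [decide_eq_decide, List.length_cons]; omega
      · by_cases hlt : x < y
        · rw [valleyLoop, if_neg hgt, if_pos hlt, valleyLoop_asc _ up (1 + 1) (by omega),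
            downRun, if_neg hgt, List.drop_zero, upRun, if_pos hlt]
          rw [Bool.eq_iff_iff]
          simp only [Bool.and_eq_true, decide_eq_true_eq, List.length_cons, Nat.cast_zero]
          omega
        · rw [valleyLoop, if_neg hgt, if_neg hlt, downRun, if_neg hgt,
            List.drop_zero, upRun, if_neg hlt]
          rw [Bool.eq_iff_iff]
          simp only [Bool.and_eq_true, decide_eq_true_eq, List.length_cons,
            Bool.false_eq_true, false_iff, Nat.cast_zero]
          omega

-- ===== VERDICT (by name: the statement is the Claim_ definition above) =====
theorem valley_spec : Claim_equal_valley := by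
  intro l _
  unfold Spec_valley valley valley_alt
  by_cases hlen : l.length < 3
  · simp [hlen]
  · simp only [hlen, if_false]
    rw [valleyLoop_desc l 1]
    by_cases h0 : downRun l = 0
    · rw [if_pos h0, h0, Bool.eq_iff_iff]
      simp only [Bool.and_eq_true, decide_eq_true_eq, List.drop_zero,
        Bool.false_eq_true, iff_false, Nat.cast_zero]
      omega
    · rw [if_neg h0, Bool.eq_iff_iff]
      simp only [Bool.and_eq_true, decide_eq_true_eq]
      omega
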